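-- pv_equiv track=rewrite | github.com/wesleymann/wordcube | app.py | compute_feedback_enhanced
-- ===== SOURCE A (Python) =====
-- def compute_feedback_enhanced(guess, solution, cube, row_idx, revealed, attempts, feedbacks, current_feedback, submission_greens=None):
--     """
--     Three-pass feedback logic:
--     Pass 1 (Green): Mark all letters that are correct at this position
--     Pass 2 (Yellow): Mark letters that are NOT green, AND match elsewhere in same row/column, AND that instance is not already green
--     Pass 3 (Purple): Mark letters that are NOT green/yellow, BUT exist somewhere on the puzzle
--     Revealed positions are shown as '_' (absent/black) regardless of feedback type.
--     """
--     result = ['_'] * 4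
--     revealed_set = set(revealed)
--     revealed_in_row = {c for (r, c) in revealed if r == row_idx}
--
--     # Collect all green positions from previous attempts and (optionally) full current submission
--     all_greens = set()
--     if submission_greens is not None:
--         all_greens.update(submission_greens)
--     for attempt_idx, fb_rows in enumerate(feedbacks):
--         for row_idx_fb, fb_chars in enumerate(fb_rows):
--             for char_idx, fb_char in enumerate(fb_chars):
--                 if fb_char == 'G':
--                     all_greens.add((row_idx_fb, char_idx))
--
--     # Include greens from current submission rows already processed (legacy fallback)
--     if submission_greens is None:
--         for row_idx_fb, fb_chars in enumerate(current_feedback):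
--             for char_idx, fb_char in enumerate(fb_chars):
--                 if fb_char == 'G':
--                     all_greens.add((row_idx_fb, char_idx))
--
--     # PASS 1: Mark correct positions (green)
--     for i, ch in enumerate(guess):
--         if ch == ' ':
--             result[i] = '_'
--         elif ch == solution[i]:
--             result[i] = 'G'
--             all_greens.add((row_idx, i))
--
--     # PASS 2: Mark yellow (in same row or column, but not green, AND not all instances matched)
--     for i, ch in enumerate(guess):
--         if ch == ' ' or result[i] == 'G':
--             continue
--
--         # Check same row: does this letter exist elsewhere in the row AND not already matched green?
--         in_row = False
--         for c in range(4):
--             if c == i or (row_idx, c) in revealed_set: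
--                 continue
--             if cube[row_idx][c] == ch and (row_idx, c) not in all_greens:
--                 in_row = True
--                 break
--
--         # Check same column: does this letter exist elsewhere (other rows) AND not already matched green?
--         in_col = False
--         for r in range(4):
--             if r == row_idx or (r, i) in revealed_set:
--                 continue
--             if cube[r][i] == ch and (r, i) not in all_greens:
--                 in_col = True
--                 break
--
--         if in_row or in_col:
--             result[i] = 'Y'
--
--     # PASS 3: Mark purple (exists on puzzle, but not in same row/col, not green, not yellow)
--     for i, ch in enumerate(guess):
--         if ch == ' ' or result[i] in ['G', 'Y']:
--             continue
--
--         # Check if letter exists anywhere else on the grid (not in same row/col, not revealed, not already green)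
--         found_elsewhere = False
--         for r in range(4):
--             for c in range(4):
--                 if cube[r][c] == ch and (r, c) not in revealed_set and (r, c) not in all_greens:
--                     # Skip current position and same row/col (those were checked in yellow)
--                     if r == row_idx or c == i:
--                         continue
--                     found_elsewhere = True
--                     break
--             if found_elsewhere:
--                 break
--
--         result[i] = 'P' if found_elsewhere else '_'
--
--     return ''.join(result)
-- ===== SOURCE B (Python) =====
-- def compute_feedback_enhanced(guess, solution, cube, row_idx, revealed, attempts, feedbacks, current_feedback, submission_greens=None):
--     # Cells that can no longer justify a hint: the revealed cells plus every green cell.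
--     blocked = set(revealed)
--     if submission_greens is not None:
--         blocked.update(submission_greens)
--     else:
--         blocked.update((r, c) for r, fb in enumerate(current_feedback)
--                        for c, f in enumerate(fb) if f == 'G')
--     blocked.update((r, c) for rows in feedbacks for r, fb in enumerate(rows)
--                    for c, f in enumerate(fb) if f == 'G')
--     blocked.update((row_idx, i) for i, ch in enumerate(guess)
--                    if ch != ' ' and ch == solution[i])
--
--     # Grid-driven classification: walk the 4x4 grid once; every unblocked cell
--     # promotes each matching non-green guess position to 'Y' (same row/column)
--     # or at least 'P' (elsewhere). rank keeps the best hint seen per position.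
--     RANK = {'_': 0, 'P': 1, 'Y': 2}
--     rank = ['_'] * 4
--     if any(ch != ' ' and ch != solution[i] for i, ch in enumerate(guess)):
--         for r in range(4):
--             for c in range(4):
--                 if (r, c) in blocked:
--                     continue
--                 letter = cube[r][c]
--                 for i, ch in enumerate(guess):
--                     if ch == ' ' or ch == solution[i] or letter != ch:
--                         continue
--                     if (r == row_idx) != (c == i):
--                         grade = 'Y'
--                     elif r != row_idx and c != i:
--                         grade = 'P'
--                     else:
--                         continue
--                     if RANK[grade] > RANK[rank[i]]:
--                         rank[i] = grade
--     out = ''.join('_' if ch == ' ' else 'G' if ch == solution[i] else rank[i]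
--                   for i, ch in enumerate(guess))
--     return out.ljust(4, '_')
-- ===== Notes on version B (the rewrite author's own statement) =====
-- stated objective: alternative
-- what changed: B inverts the traversal: instead of A's three result-mutating passes that re-scan the row, the column and the whole grid per guess letter with break-loops, B builds one blocked set (revealed union all greens) and walks the 4x4 grid ONCE, each unblocked cell pushing a graded contribution ('Y' for same row/column, 'P' for elsewhere) into a per-position best-rank accumulator.
import Mathlib
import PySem

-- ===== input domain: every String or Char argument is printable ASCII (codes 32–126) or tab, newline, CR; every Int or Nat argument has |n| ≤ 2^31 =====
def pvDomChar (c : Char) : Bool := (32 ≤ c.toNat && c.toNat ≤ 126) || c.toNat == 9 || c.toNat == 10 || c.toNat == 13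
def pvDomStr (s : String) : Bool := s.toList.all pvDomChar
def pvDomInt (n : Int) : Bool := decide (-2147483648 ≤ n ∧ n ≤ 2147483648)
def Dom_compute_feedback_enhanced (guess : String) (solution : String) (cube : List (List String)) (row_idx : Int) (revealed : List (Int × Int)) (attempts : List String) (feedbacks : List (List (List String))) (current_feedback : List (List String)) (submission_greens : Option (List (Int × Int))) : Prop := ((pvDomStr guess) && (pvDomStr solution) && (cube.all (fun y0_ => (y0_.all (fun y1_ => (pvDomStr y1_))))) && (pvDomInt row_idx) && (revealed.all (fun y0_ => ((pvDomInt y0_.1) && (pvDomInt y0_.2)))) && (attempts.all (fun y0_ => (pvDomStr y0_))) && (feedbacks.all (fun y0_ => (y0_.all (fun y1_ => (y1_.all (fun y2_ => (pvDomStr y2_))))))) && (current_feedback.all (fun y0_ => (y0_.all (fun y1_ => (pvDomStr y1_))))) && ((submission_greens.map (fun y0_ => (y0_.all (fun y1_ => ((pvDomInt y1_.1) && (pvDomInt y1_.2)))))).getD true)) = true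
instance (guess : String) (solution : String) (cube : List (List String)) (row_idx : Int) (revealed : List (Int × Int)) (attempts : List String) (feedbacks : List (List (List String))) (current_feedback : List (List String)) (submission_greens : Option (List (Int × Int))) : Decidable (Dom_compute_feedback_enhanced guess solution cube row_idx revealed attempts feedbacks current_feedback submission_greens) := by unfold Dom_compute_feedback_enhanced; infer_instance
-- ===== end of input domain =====

-- B inverts the traversal: where A runs three result-mutating passes that re-scan the row, the
-- column and the whole grid per guess letter with break-loops, B builds one blocked set
-- (revealed ∪ greens) and walks the 4x4 grid ONCE, each unblocked cell pushing a graded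
-- contribution (Y for same row/column, P for elsewhere) into a per-position best-rank
-- accumulator; objective: alternative, same cost.

-- ===== PORT A =====
-- shared tiny accessor: cube[r][c] (none = IndexError)
def feCell (cube : List (List String)) (r c : Int) : Option String :=
  (PySem.List.pyGet? cube r).bind fun row => PySem.List.pyGet? row c

-- A: all_greens accumulation (set(); update(sg); feedbacks loops; legacy current_feedback loops)
def feGreensA (submission_greens : Option (List (Int × Int))) (feedbacks : List (List (List String))) (current_feedback : List (List String)) : PySem.Set (Int × Int) :=
  let all_greens : PySem.Set (Int × Int) := PySem.Set.empty
  let all_greens :=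
    match submission_greens with
    | some sg => PySem.Set.update all_greens sg
    | none => all_greens
  let all_greens := (PySem.List.enumerate feedbacks).foldl (fun s p =>
      (PySem.List.enumerate p.2).foldl (fun s q =>
        (PySem.List.enumerate q.2).foldl (fun s t =>
          if t.2 == "G" then PySem.Set.add s (q.1, t.1) else s) s) s) all_greens
  match submission_greens with
  | none => (PySem.List.enumerate current_feedback).foldl (fun s q =>
      (PySem.List.enumerate q.2).foldl (fun s t =>
        if t.2 == "G" then PySem.Set.add s (q.1, t.1) else s) s) all_greens
  | some _ => all_greens

-- A PASS 1 (enumerate loop as structural recursion, i the running index)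
def feP1 (solution : String) (row_idx : Int) : List Char → Int → List String → PySem.Set (Int × Int) → List String × PySem.Set (Int × Int)
  | [], _, res, s => (res, s)
  | ch :: t, i, res, s =>
    if ch == ' ' then feP1 solution row_idx t (i + 1) (PySem.List.pySetD res i "_") s
    else if some ch == PySem.Str.pyGet? solution i then
      feP1 solution row_idx t (i + 1) (PySem.List.pySetD res i "G") (PySem.Set.add s (row_idx, i))
    else feP1 solution row_idx t (i + 1) res s

-- A PASS 2 inner loops (with break = .any)
def feInRow (cube : List (List String)) (revealed_set greens : PySem.Set (Int × Int)) (row_idx i : Int) (ch : Char) : Bool :=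
  (PySem.List.pyRange 0 4 1).any fun c =>
    if c == i || PySem.Set.contains revealed_set (row_idx, c) then false
    else feCell cube row_idx c == some (String.ofList [ch]) && !(PySem.Set.contains greens (row_idx, c))

def feInCol (cube : List (List String)) (revealed_set greens : PySem.Set (Int × Int)) (row_idx i : Int) (ch : Char) : Bool :=
  (PySem.List.pyRange 0 4 1).any fun r =>
    if r == row_idx || PySem.Set.contains revealed_set (r, i) then false
    else feCell cube r i == some (String.ofList [ch]) && !(PySem.Set.contains greens (r, i))

-- A PASS 2
def feP2 (cube : List (List String)) (revealed_set greens : PySem.Set (Int × Int)) (row_idx : Int) : List Char → Int → List String → List String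
  | [], _, res => res
  | ch :: t, i, res =>
    if ch == ' ' || PySem.List.pyGetD res i "" == "G" then feP2 cube revealed_set greens row_idx t (i + 1) res
    else
      let in_row := feInRow cube revealed_set greens row_idx i ch
      let in_col := feInCol cube revealed_set greens row_idx i ch
      if in_row || in_col then feP2 cube revealed_set greens row_idx t (i + 1) (PySem.List.pySetD res i "Y")
      else feP2 cube revealed_set greens row_idx t (i + 1) res

-- A PASS 3 inner double loop (with breaks = .any)
def feFoundElsewhere (cube : List (List String)) (revealed_set greens : PySem.Set (Int × Int)) (row_idx i : Int) (ch : Char) : Bool :=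
  (PySem.List.pyRange 0 4 1).any fun r =>
    (PySem.List.pyRange 0 4 1).any fun c =>
      if feCell cube r c == some (String.ofList [ch]) && !(PySem.Set.contains revealed_set (r, c)) && !(PySem.Set.contains greens (r, c)) then
        if r == row_idx || c == i then false else true
      else false

-- A PASS 3
def feP3 (cube : List (List String)) (revealed_set greens : PySem.Set (Int × Int)) (row_idx : Int) : List Char → Int → List String → List String
  | [], _, res => res
  | ch :: t, i, res =>
    if ch == ' ' || ["G", "Y"].contains (PySem.List.pyGetD res i "") then feP3 cube revealed_set greens row_idx t (i + 1) res
    else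
      let found := feFoundElsewhere cube revealed_set greens row_idx i ch
      feP3 cube revealed_set greens row_idx t (i + 1) (PySem.List.pySetD res i (if found then "P" else "_"))

def compute_feedback_enhanced (guess : String) (solution : String) (cube : List (List String)) (row_idx : Int) (revealed : List (Int × Int)) (attempts : List String) (feedbacks : List (List (List String))) (current_feedback : List (List String)) (submission_greens : Option (List (Int × Int))) : String :=
  let result : List String := List.replicate 4 "_"
  let revealed_set : PySem.Set (Int × Int) := PySem.Set.ofList revealed
  let _revealed_in_row : PySem.Set Int :=
    PySem.Set.ofList ((revealed.filter (fun rc => rc.1 == row_idx)).map (·.2))  -- unused in A too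
  let st := feP1 solution row_idx guess.toList 0 result (feGreensA submission_greens feedbacks current_feedback)
  let res2 := feP2 cube revealed_set st.2 row_idx guess.toList 0 st.1
  let res3 := feP3 cube revealed_set st.2 row_idx guess.toList 0 res2
  PySem.Str.join "" res3

-- ===== PORT B =====
-- B: green coordinates contributed by previous feedbacks (one generator expression)
def feFbGreensList (feedbacks : List (List (List String))) : List (Int × Int) :=
  feedbacks.flatMap fun rows =>
    (PySem.List.enumerate rows).flatMap fun p =>
      (PySem.List.enumerate p.2).filterMap fun q => if q.2 == "G" then some (p.1, q.1) else none

-- B: blocked = set(revealed) updated with every green source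
def feBlocked (guess sol : String) (row : Int) (rev : List (Int × Int)) (fbs : List (List (List String))) (cf : List (List String)) (sg : Option (List (Int × Int))) : PySem.Set (Int × Int) :=
  let b := PySem.Set.ofList rev
  let b := match sg with
    | some l => PySem.Set.update b l
    | none => PySem.Set.update b ((PySem.List.enumerate cf).flatMap fun p =>
        (PySem.List.enumerate p.2).filterMap fun q => if q.2 == "G" then some (p.1, q.1) else none)
  let b := PySem.Set.update b (feFbGreensList fbs)
  PySem.Set.update b ((PySem.List.enumerate guess.toList).filterMap fun p =>
    if p.2 != ' ' && some p.2 == PySem.Str.pyGet? sol p.1 then some (row, p.1) else none)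

-- B: RANK = {'_': 0, 'P': 1, 'Y': 2}
def feRank (s : String) : Nat := if s == "Y" then 2 else if s == "P" then 1 else 0

-- B: inner loop — one unblocked cell (r,c) holding `letter` promotes matching positions
def feInner (sol : String) (row : Int) (letter : String) (r c : Int) : List Char → Int → List String → List String
  | [], _, rank => rank
  | ch :: t, i, rank =>
    if ch == ' ' || some ch == PySem.Str.pyGet? sol i || letter != String.ofList [ch] then
      feInner sol row letter r c t (i + 1) rank
    else if (r == row) != (c == i) then      -- grade = 'Y'
      if feRank "Y" > feRank (PySem.List.pyGetD rank i "") then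
        feInner sol row letter r c t (i + 1) (PySem.List.pySetD rank i "Y")
      else feInner sol row letter r c t (i + 1) rank
    else if r != row && c != i then          -- grade = 'P'
      if feRank "P" > feRank (PySem.List.pyGetD rank i "") then
        feInner sol row letter r c t (i + 1) (PySem.List.pySetD rank i "P")
      else feInner sol row letter r c t (i + 1) rank
    else feInner sol row letter r c t (i + 1) rank

-- B: the single walk over the 4x4 grid
def feGrid (guess sol : String) (cube : List (List String)) (row : Int) (blocked : PySem.Set (Int × Int)) (rank : List String) : List String :=
  (PySem.List.pyRange 0 4 1).foldl (fun rank r =>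
    (PySem.List.pyRange 0 4 1).foldl (fun rank c =>
      if PySem.Set.contains blocked (r, c) then rank
      else feInner sol row ((feCell cube r c).getD "") r c guess.toList 0 rank) rank) rank

def compute_feedback_enhanced_alt (guess : String) (solution : String) (cube : List (List String)) (row_idx : Int) (revealed : List (Int × Int)) (attempts : List String) (feedbacks : List (List (List String))) (current_feedback : List (List String)) (submission_greens : Option (List (Int × Int))) : String :=
  let blocked := feBlocked guess solution row_idx revealed feedbacks current_feedback submission_greens
  let rank0 : List String := List.replicate 4 "_"
  let rank :=
    if (PySem.List.enumerate guess.toList).any (fun p => p.2 != ' ' && !(some p.2 == PySem.Str.pyGet? solution p.1)) then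
      feGrid guess solution cube row_idx blocked rank0
    else rank0
  let out := (PySem.List.enumerate guess.toList).map fun p =>
    if p.2 == ' ' then "_"
    else if some p.2 == PySem.Str.pyGet? solution p.1 then "G"
    else PySem.List.pyGetD rank p.1 "_"
  -- ''.join(out).ljust(4, '_'): every entry of out is one char, so pad with 4 - len underscores
  PySem.Str.join "" out ++ String.ofList (List.replicate (4 - guess.toList.length) '_')

-- ===== PRECONDITION & SPEC =====
-- Pre_ excludes exactly the inputs where Python A raises (guess longer than the 4-cell row,
-- a non-space guess letter beyond the end of solution, or — when some letter is neither space
-- nor green, so the grid scans run — a cube without full 4x4 shape), plus inputs with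
-- row_idx outside 0..3, where A's negative-index wraparound row scan is an accident B does
-- not reproduce (and row_idx ≥ 4 with an oversized cube likewise).
def Pre_compute_feedback_enhanced (guess : String) (solution : String) (cube : List (List String)) (row_idx : Int) (revealed : List (Int × Int)) (attempts : List String) (feedbacks : List (List (List String))) (current_feedback : List (List String)) (submission_greens : Option (List (Int × Int))) : Prop :=
  guess.toList.length ≤ 4 ∧
  (∀ i ∈ List.range guess.toList.length, guess.toList.getD i ' ' ≠ ' ' → i < solution.toList.length) ∧
  ((∃ i ∈ List.range guess.toList.length, guess.toList.getD i ' ' ≠ ' ' ∧ solution.toList[i]? ≠ some (guess.toList.getD i ' ')) →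
    (4 ≤ cube.length ∧ (∀ row ∈ cube.take 4, 4 ≤ row.length) ∧ 0 ≤ row_idx ∧ row_idx < 4))
instance (guess : String) (solution : String) (cube : List (List String)) (row_idx : Int) (revealed : List (Int × Int)) (attempts : List String) (feedbacks : List (List (List String))) (current_feedback : List (List String)) (submission_greens : Option (List (Int × Int))) : Decidable (Pre_compute_feedback_enhanced guess solution cube row_idx revealed attempts feedbacks current_feedback submission_greens) := by unfold Pre_compute_feedback_enhanced; infer_instance

def pvWitness_compute_feedback_enhanced : String × String × List (List String) × Int × (List (Int × Int)) × List String × List (List (List String)) × List (List String) × (Option (List (Int × Int))) :=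
  ("abcd", "abca", [["a","b","c","d"], ["e","f","g","h"], ["i","j","k","l"], ["m","n","o","p"]], 0, [(1, 1)], [], [], [], none)

def Spec_compute_feedback_enhanced (guess : String) (solution : String) (cube : List (List String)) (row_idx : Int) (revealed : List (Int × Int)) (attempts : List String) (feedbacks : List (List (List String))) (current_feedback : List (List String)) (submission_greens : Option (List (Int × Int))) (out : String) : Prop := out = compute_feedback_enhanced_alt guess solution cube row_idx revealed attempts feedbacks current_feedback submission_greens
instance (guess : String) (solution : String) (cube : List (List String)) (row_idx : Int) (revealed : List (Int × Int)) (attempts : List String) (feedbacks : List (List (List String))) (current_feedback : List (List String)) (submission_greens : Option (List (Int × Int))) (out : String) : Decidable (Spec_compute_feedback_enhanced guess solution cube row_idx revealed attempts feedbacks current_feedback submission_greens out) := by unfold Spec_compute_feedback_enhanced; infer_instance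

-- ===== CLAIM (what is proved, stated in full; the proofs are below) =====
def Claim_equal_compute_feedback_enhanced : Prop := ∀ (guess : String) (solution : String) (cube : List (List String)) (row_idx : Int) (revealed : List (Int × Int)) (attempts : List String) (feedbacks : List (List (List String))) (current_feedback : List (List String)) (submission_greens : Option (List (Int × Int))), Dom_compute_feedback_enhanced guess solution cube row_idx revealed attempts feedbacks current_feedback submission_greens → Pre_compute_feedback_enhanced guess solution cube row_idx revealed attempts feedbacks current_feedback submission_greens → Spec_compute_feedback_enhanced guess solution cube row_idx revealed attempts feedbacks current_feedback submission_greens (compute_feedback_enhanced guess solution cube row_idx revealed attempts feedbacks current_feedback submission_greens)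

-- ===== LEMMAS AND PROOFS =====

theorem pvWitness_ok : Dom_compute_feedback_enhanced (pvWitness_compute_feedback_enhanced.1) (pvWitness_compute_feedback_enhanced.2.1) (pvWitness_compute_feedback_enhanced.2.2.1) (pvWitness_compute_feedback_enhanced.2.2.2.1) (pvWitness_compute_feedback_enhanced.2.2.2.2.1) (pvWitness_compute_feedback_enhanced.2.2.2.2.2.1) (pvWitness_compute_feedback_enhanced.2.2.2.2.2.2.1) (pvWitness_compute_feedback_enhanced.2.2.2.2.2.2.2.1) (pvWitness_compute_feedback_enhanced.2.2.2.2.2.2.2.2) ∧ Pre_compute_feedback_enhanced (pvWitness_compute_feedback_enhanced.1) (pvWitness_compute_feedback_enhanced.2.1) (pvWitness_compute_feedback_enhanced.2.2.1) (pvWitness_compute_feedback_enhanced.2.2.2.1) (pvWitness_compute_feedback_enhanced.2.2.2.2.1) (pvWitness_compute_feedback_enhanced.2.2.2.2.2.1) (pvWitness_compute_feedback_enhanced.2.2.2.2.2.2.1) (pvWitness_compute_feedback_enhanced.2.2.2.2.2.2.2.1) (pvWitness_compute_feedback_enhanced.2.2.2.2.2.2.2.2) := by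
  constructor <;> decide

-- generic membership shape of the innermost "if 'G' then add" loop
theorem memCA (l : List (Int × String)) (r : Int) (s : PySem.Set (Int × Int)) (x : Int × Int) :
    x ∈ l.foldl (fun s t => if t.2 == "G" then PySem.Set.add s (r, t.1) else s) s ↔
      x ∈ s ∨ ∃ t ∈ l, t.2 = "G" ∧ x = (r, t.1) := by
  induction l generalizing s with
  | nil => simp
  | cons h t ih =>
    simp only [List.foldl_cons, ih]
    by_cases hG : h.2 = "G" <;> simp [hG, PySem.Set.mem_add] <;> tauto

theorem memRows (l : List (Int × List String)) (s : PySem.Set (Int × Int)) (x : Int × Int) :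
    x ∈ l.foldl (fun s q => (PySem.List.enumerate q.2).foldl
        (fun s t => if t.2 == "G" then PySem.Set.add s (q.1, t.1) else s) s) s ↔
      x ∈ s ∨ ∃ q ∈ l, ∃ t ∈ PySem.List.enumerate q.2, t.2 = "G" ∧ x = (q.1, t.1) := by
  induction l generalizing s with
  | nil => simp
  | cons h t ih =>
    rw [List.foldl_cons, ih, memCA]
    simp only [List.exists_mem_cons_iff]
    rw [or_assoc]

theorem memFbs (l : List (Int × List (List String))) (s : PySem.Set (Int × Int)) (x : Int × Int) :
    x ∈ l.foldl (fun s p => (PySem.List.enumerate p.2).foldl (fun s q => (PySem.List.enumerate q.2).foldl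
        (fun s t => if t.2 == "G" then PySem.Set.add s (q.1, t.1) else s) s) s) s ↔
      x ∈ s ∨ ∃ p ∈ l, ∃ q ∈ PySem.List.enumerate p.2, ∃ t ∈ PySem.List.enumerate q.2, t.2 = "G" ∧ x = (q.1, t.1) := by
  induction l generalizing s with
  | nil => simp
  | cons h t ih =>
    rw [List.foldl_cons, ih, memRows]
    simp only [List.exists_mem_cons_iff]
    rw [or_assoc]

theorem exists_enumerate_snd {α : Type} (xs : List α) (s : Int) (P : α → Prop) :
    (∃ p ∈ PySem.List.enumerate xs s, P p.2) ↔ ∃ a ∈ xs, P a := by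
  induction xs generalizing s with
  | nil => simp [PySem.List.enumerate_nil]
  | cons h t ih => simp [PySem.List.enumerate_cons, ih]

theorem mem_feGreensA (sg : Option (List (Int × Int))) (fbs : List (List (List String)))
    (cf : List (List String)) (x : Int × Int) :
    x ∈ feGreensA sg fbs cf ↔
      ((match sg with
        | some l => x ∈ l
        | none => ∃ q ∈ PySem.List.enumerate cf, ∃ t ∈ PySem.List.enumerate q.2, t.2 = "G" ∧ x = (q.1, t.1)) ∨
       ∃ rows ∈ fbs, ∃ q ∈ PySem.List.enumerate rows, ∃ t ∈ PySem.List.enumerate q.2, t.2 = "G" ∧ x = (q.1, t.1)) := by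
  unfold feGreensA
  cases sg with
  | none =>
    rw [memRows, memFbs,
      exists_enumerate_snd fbs 0 (fun rows => ∃ q ∈ PySem.List.enumerate rows, ∃ t ∈ PySem.List.enumerate q.2, t.2 = "G" ∧ x = (q.1, t.1))]
    simp [PySem.Set.empty]
    exact or_comm
  | some l =>
    rw [memFbs,
      exists_enumerate_snd fbs 0 (fun rows => ∃ q ∈ PySem.List.enumerate rows, ∃ t ∈ PySem.List.enumerate q.2, t.2 = "G" ∧ x = (q.1, t.1))]
    simp [PySem.Set.mem_update, PySem.Set.empty]

theorem feP1_snd_mem (sol : String) (row : Int) (g : List Char) (i : Int) (res : List String)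
    (s : PySem.Set (Int × Int)) (x : Int × Int) :
    x ∈ (feP1 sol row g i res s).2 ↔
      x ∈ s ∨ ∃ p ∈ PySem.List.enumerate g i, p.2 ≠ ' ' ∧ some p.2 = PySem.Str.pyGet? sol p.1 ∧ x = (row, p.1) := by
  induction g generalizing i res s with
  | nil => simp [feP1, PySem.List.enumerate_nil]
  | cons ch t ih =>
    simp only [feP1, PySem.List.enumerate_cons, List.exists_mem_cons_iff]
    by_cases h1 : ch = ' '
    · simp [h1, ih]
    · by_cases h2 : some ch = PySem.List.pyGet? sol.toList i
      · simp [h1, h2, ih, PySem.Set.mem_add]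
        tauto
      · simp [h1, h2, ih]

-- B's blocked set = set(revealed) ∪ A's final all_greens (members)
theorem mem_feBlocked (guess sol : String) (row : Int) (rev : List (Int × Int))
    (fbs : List (List (List String))) (cf : List (List String)) (sg : Option (List (Int × Int)))
    (res : List String) (x : Int × Int) :
    x ∈ feBlocked guess sol row rev fbs cf sg ↔
      x ∈ PySem.Set.ofList rev ∨ x ∈ (feP1 sol row guess.toList 0 res (feGreensA sg fbs cf)).2 := by
  rw [feP1_snd_mem, mem_feGreensA]
  unfold feBlocked feFbGreensList
  cases sg <;>
  · simp only [PySem.Set.mem_update, PySem.Set.mem_ofList, List.mem_flatMap, List.mem_filterMap,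
      Option.ite_none_right_eq_some, Option.some_inj, beq_iff_eq, Bool.and_eq_true, bne_iff_ne]
    aesop

-- generic view of A's result-mutating passes and B's inner loop: set position i from (ch, i, old)
def feLoop (st : Char → Int → List String → List String) : List Char → Int → List String → List String
  | [], _, res => res
  | ch :: t, i, res => feLoop st t (i + 1) (st ch i res)

theorem pySetD_pyGetD_self (xs : List String) (i : Int) :
    PySem.List.pySetD xs i (PySem.List.pyGetD xs i "") = xs := by
  simp only [PySem.List.pySetD, PySem.List.pyGetD, PySem.List.pySet?, PySem.List.pyGet?, PySem.List.pyIdx?]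
  split_ifs <;> simp_all
  rw [List.getElem?_eq_getElem (by omega)]
  simp

theorem getD_set_eq (res : List String) (m j : Nat) (v : String) :
    (res.set m v).getD j "" = if j = m ∧ m < res.length then v else res.getD j "" := by
  simp [List.getD_eq_getElem?_getD, List.getElem?_set]
  split_ifs <;> simp_all

theorem feLoop_getD (f : Char → Int → String → String) (st : Char → Int → List String → List String)
    (hst : ∀ ch (i : Int) res, st ch i res = PySem.List.pySetD res i (f ch i (PySem.List.pyGetD res i "")))
    (g : List Char) (m : Nat) (res : List String) (j : Nat) :
    (feLoop st g (m : Int) res).getD j "" =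
      if m ≤ j ∧ j < m + g.length ∧ j < res.length then
        f (g.getD (j - m) ' ') (j : Int) (res.getD j "")
      else res.getD j "" := by
  induction g generalizing m res with
  | nil => rw [feLoop, if_neg (by simp; omega)]
  | cons ch t ih =>
    rw [feLoop, hst, show ((m : Int) + 1) = ((m + 1 : Nat) : Int) by push_cast; ring,
      PySem.List.pySetD_natCast, PySem.List.pyGetD_natCast, ih]
    simp only [List.length_set, List.length_cons]
    rcases Nat.lt_trichotomy j m with hj | rfl | hj
    · rw [if_neg (show ¬(m + 1 ≤ j ∧ j < m + 1 + t.length ∧ j < res.length) by omega),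
        if_neg (show ¬(m ≤ j ∧ j < m + (t.length + 1) ∧ j < res.length) by omega),
        getD_set_eq, if_neg (show ¬(j = m ∧ m < res.length) by omega)]
    · rw [if_neg (show ¬(j + 1 ≤ j ∧ j < j + 1 + t.length ∧ j < res.length) by omega),
        getD_set_eq, Nat.sub_self, List.getD_cons_zero]
      split_ifs with h1 h2
      · rfl
      · omega
      · omega
      · rfl
    · rw [getD_set_eq, if_neg (show ¬(j = m ∧ m < res.length) by omega),
        show j - m = (j - (m + 1)) + 1 by omega, List.getD_cons_succ]
      split_ifs with h1 h2
      · rfl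
      · omega
      · omega
      · rfl

theorem feLoop_length (st : Char → Int → List String → List String)
    (hst : ∀ ch (i : Int) res, (st ch i res).length = res.length)
    (g : List Char) (i : Int) (res : List String) :
    (feLoop st g i res).length = res.length := by
  induction g generalizing i res with
  | nil => rfl
  | cons ch t ih => rw [feLoop, ih, hst]

-- the per-position value functions of A's three passes
def feF1 (sol : String) : Char → Int → String → String := fun ch i v =>
  if ch = ' ' then "_" else if some ch = PySem.List.pyGet? sol.toList i then "G" else v

def feF2 (cube : List (List String)) (rs gr : PySem.Set (Int × Int)) (row : Int) :
    Char → Int → String → String := fun ch i v =>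
  if ch = ' ' ∨ v = "G" then v
  else if feInRow cube rs gr row i ch || feInCol cube rs gr row i ch then "Y" else v

def feF3 (cube : List (List String)) (rs gr : PySem.Set (Int × Int)) (row : Int) :
    Char → Int → String → String := fun ch i v =>
  if ch = ' ' ∨ (v = "G" ∨ v = "Y") then v
  else if feFoundElsewhere cube rs gr row i ch then "P" else "_"

-- the per-position value function of B's inner loop for one cell
def feFB (sol : String) (row : Int) (letter : String) (r c : Int) :
    Char → Int → String → String := fun ch i v =>
  if ch = ' ' ∨ some ch = PySem.List.pyGet? sol.toList i ∨ ¬letter = String.ofList [ch] then v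
  else if ((r == row) != (c == i)) = true then (if feRank "Y" > feRank v then "Y" else v)
  else if (r ≠ row ∧ c ≠ i) then (if feRank "P" > feRank v then "P" else v)
  else v

theorem feP1_fst_eq (sol : String) (row : Int) (g : List Char) (i : Int) (res : List String)
    (s : PySem.Set (Int × Int)) :
    (feP1 sol row g i res s).1 =
      feLoop (fun ch i res => PySem.List.pySetD res i (feF1 sol ch i (PySem.List.pyGetD res i ""))) g i res := by
  induction g generalizing i res s with
  | nil => rfl
  | cons ch t ih =>
    by_cases h1 : ch = ' '
    · simp only [feP1, feLoop, h1, beq_self_eq_true, if_true]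
      rw [ih]
      all_goals (congr 1 <;> simp [feF1])
    · by_cases h2 : some ch = PySem.List.pyGet? sol.toList i
      · simp only [feP1, feLoop]
        rw [if_neg (by simp [h1]), if_pos (by simp [h2]), ih]
        all_goals (congr 1 <;> simp [feF1, h1, h2])
      · simp only [feP1, feLoop]
        rw [if_neg (by simp [h1]), if_neg (by simp [h2]), ih]
        all_goals (congr 1 <;> simp [feF1, h1, h2, pySetD_pyGetD_self])

theorem feP2_eq (cube : List (List String)) (rs gr : PySem.Set (Int × Int)) (row : Int)
    (g : List Char) (i : Int) (res : List String) :
    feP2 cube rs gr row g i res =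
      feLoop (fun ch i res => PySem.List.pySetD res i (feF2 cube rs gr row ch i (PySem.List.pyGetD res i ""))) g i res := by
  induction g generalizing i res with
  | nil => rfl
  | cons ch t ih =>
    simp only [feP2, feLoop]
    by_cases h1 : ch = ' ' ∨ PySem.List.pyGetD res i "" = "G"
    · rw [if_pos (by rcases h1 with h | h <;> simp [h]), ih]
      all_goals (congr 1 <;> simp [feF2, h1, pySetD_pyGetD_self])
    · obtain ⟨ha, hb⟩ := not_or.mp h1
      rw [if_neg (by simp [ha, hb])]
      by_cases h2 : (feInRow cube rs gr row i ch || feInCol cube rs gr row i ch) = true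
      · rw [if_pos h2, ih]
        all_goals (congr 1 <;> simp [feF2, ha, hb, h2])
      · rw [if_neg h2, ih]
        all_goals (congr 1 <;> simp [feF2, ha, hb, Bool.eq_false_iff.mpr h2, pySetD_pyGetD_self])

theorem feP3_eq (cube : List (List String)) (rs gr : PySem.Set (Int × Int)) (row : Int)
    (g : List Char) (i : Int) (res : List String) :
    feP3 cube rs gr row g i res =
      feLoop (fun ch i res => PySem.List.pySetD res i (feF3 cube rs gr row ch i (PySem.List.pyGetD res i ""))) g i res := by
  induction g generalizing i res with
  | nil => rfl
  | cons ch t ih =>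
    simp only [feP3, feLoop]
    by_cases h1 : ch = ' ' ∨ (PySem.List.pyGetD res i "" = "G" ∨ PySem.List.pyGetD res i "" = "Y")
    · rw [if_pos (by rcases h1 with h | h | h <;> simp [h]), ih]
      all_goals (congr 1 <;> simp [feF3, h1, pySetD_pyGetD_self])
    · obtain ⟨ha, hbc⟩ := not_or.mp h1
      obtain ⟨hb, hc⟩ := not_or.mp hbc
      rw [if_neg (by simp [ha, hb, hc]), ih]
      all_goals (congr 1 <;> simp [feF3, ha, hb, hc])

-- B's inner loop in the same generic shape
theorem feInner_eq (sol : String) (row : Int) (letter : String) (r c : Int)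
    (g : List Char) (i : Int) (rank : List String) :
    feInner sol row letter r c g i rank =
      feLoop (fun ch i res => PySem.List.pySetD res i (feFB sol row letter r c ch i (PySem.List.pyGetD res i ""))) g i rank := by
  induction g generalizing i rank with
  | nil => rfl
  | cons ch t ih =>
    simp only [feInner, feLoop]
    by_cases h1 : ch = ' ' ∨ some ch = PySem.List.pyGet? sol.toList i ∨ ¬letter = String.ofList [ch]
    · rw [if_pos (by rcases h1 with h | h | h <;> simp [h, PySem.Str.pyGet?, PySem.Chars.pyGet?]), ih]
      all_goals (congr 1 <;> simp [feFB, h1, pySetD_pyGetD_self])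
    · obtain ⟨ha, hbc⟩ := not_or.mp h1
      obtain ⟨hb, hc⟩ := not_or.mp hbc
      rw [if_neg (by simp [ha, hb, not_not.mp hc, PySem.Str.pyGet?, PySem.Chars.pyGet?])]
      by_cases hx : ((r == row) != (c == i)) = true
      · rw [if_pos hx]
        by_cases hcmp : feRank "Y" > feRank (PySem.List.pyGetD rank i "")
        · rw [if_pos hcmp, ih]
          all_goals (congr 1 <;> simp [feFB, ha, hb, hc, hx, hcmp])
        · rw [if_neg hcmp, ih]
          all_goals (congr 1 <;> simp [feFB, ha, hb, hc, hx, hcmp, pySetD_pyGetD_self])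
      · rw [if_neg hx]
        by_cases ho : (r != row && c != i) = true
        · rw [if_pos ho]
          have ho' : r ≠ row ∧ c ≠ i := by simpa using ho
          by_cases hcmp : feRank "P" > feRank (PySem.List.pyGetD rank i "")
          · rw [if_pos hcmp, ih]
            all_goals (congr 1 <;> simp [feFB, ha, hb, hc, hx, hcmp, ho'])
          · rw [if_neg hcmp, ih]
            all_goals (congr 1 <;> simp [feFB, ha, hb, hc, hx, hcmp, pySetD_pyGetD_self, ho'])
        · rw [if_neg ho, ih]
          have ho' : ¬(r ≠ row ∧ c ≠ i) := by simpa using ho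
          all_goals (congr 1 <;> simp [feFB, ha, hb, hc, hx, ho', pySetD_pyGetD_self])

-- entrywise view of a fold over cells that rewrites the rank list
theorem foldl_entry {σ : Type} (F : List String → σ → List String) (e : String → σ → String) (j : Nat) :
    ∀ (l : List σ) (rank : List String), rank.length = 4 →
      (∀ rk s, rk.length = 4 → (F rk s).length = 4 ∧ (F rk s).getD j "" = e (rk.getD j "") s) →
      (l.foldl F rank).length = 4 ∧ (l.foldl F rank).getD j "" = l.foldl e (rank.getD j "") := by
  intro l
  induction l with
  | nil => intro rank hr _; exact ⟨hr, rfl⟩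
  | cons a t ih =>
    intro rank hr h
    obtain ⟨hl, hg⟩ := h rank a hr
    obtain ⟨hl2, hg2⟩ := ih (F rank a) hl h
    exact ⟨hl2, by rw [List.foldl_cons, hg2, hg, List.foldl_cons]⟩

-- rank values as numbers
def feVal (n : Nat) : String := if n = 2 then "Y" else if n = 1 then "P" else "_"

-- the weight one grid cell contributes to one pending guess position
def feW (cube : List (List String)) (blocked : PySem.Set (Int × Int)) (row jI : Int) (ch : Char) (r c : Int) : Nat :=
  if PySem.Set.contains blocked (r, c) then 0
  else if ¬(feCell cube r c).getD "" = String.ofList [ch] then 0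
  else if ((r == row) != (c == jI)) = true then 2
  else if r ≠ row ∧ c ≠ jI then 1
  else 0

theorem feW_le (cube : List (List String)) (blocked : PySem.Set (Int × Int)) (row jI : Int)
    (ch : Char) (r c : Int) : feW cube blocked row jI ch r c ≤ 2 := by
  unfold feW; split_ifs <;> omega

theorem feW_cases (cube : List (List String)) (blocked : PySem.Set (Int × Int)) (row jI : Int)
    (ch : Char) (r c : Int) :
    feW cube blocked row jI ch r c = 0 ∨ feW cube blocked row jI ch r c = 1 ∨ feW cube blocked row jI ch r c = 2 := by
  unfold feW; split_ifs <;> simp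

theorem feFB_val (sol : String) (row : Int) (blocked : PySem.Set (Int × Int))
    (cube : List (List String)) (ch : Char) (jI : Int)
    (hch : ¬ch = ' ') (hgr : ¬some ch = PySem.List.pyGet? sol.toList jI)
    (r c : Int) (m : Nat) (hm : m ≤ 2) :
    (if PySem.Set.contains blocked (r, c) then feVal m
     else feFB sol row ((feCell cube r c).getD "") r c ch jI (feVal m)) =
      feVal (max m (feW cube blocked row jI ch r c)) := by
  unfold feW feFB
  by_cases hb : PySem.Set.contains blocked (r, c) = true
  · rw [if_pos hb, if_pos hb]
    simp
  · rw [if_neg hb, if_neg hb]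
    by_cases hl : (feCell cube r c).getD "" = String.ofList [ch]
    · rw [if_neg (by simp [hch, hgr, hl]), if_neg (not_not_intro hl)]
      by_cases hx : ((r == row) != (c == jI)) = true
      · rw [if_pos hx, if_pos hx]
        interval_cases m <;> rfl
      · rw [if_neg hx, if_neg hx]
        by_cases ho : r ≠ row ∧ c ≠ jI
        · rw [if_pos ho, if_pos ho]
          interval_cases m <;> rfl
        · rw [if_neg ho, if_neg ho]
          simp
    · rw [if_pos (Or.inr (Or.inr hl)), if_pos hl]
      simp

theorem foldl_max_shift {α : Type} (w : α → Nat) :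
    ∀ (L : List α) (m : Nat),
      L.foldl (fun n x => max n (w x)) m = max m (L.foldl (fun n x => max n (w x)) 0) := by
  intro L
  induction L with
  | nil => intro m; simp
  | cons a t ih =>
    intro m
    rw [List.foldl_cons, ih, List.foldl_cons, ih (max 0 (w a)), Nat.zero_max, Nat.max_assoc]

theorem foldl_max_le {α : Type} (w : α → Nat) (k : Nat) :
    ∀ (L : List α) (m : Nat), m ≤ k → (∀ x ∈ L, w x ≤ k) →
      L.foldl (fun n x => max n (w x)) m ≤ k := by
  intro L
  induction L with
  | nil => intro m hm _; exact hm
  | cons a t ih =>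
    intro m hm hw
    exact ih _ (max_le hm (hw a (by simp))) (fun x hx => hw x (by simp [hx]))

theorem le_foldl_max_of_mem {α : Type} (w : α → Nat) :
    ∀ (L : List α) (m : Nat) (x : α), x ∈ L → w x ≤ L.foldl (fun n y => max n (w y)) m := by
  intro L
  induction L with
  | nil => intro m x hx; simp at hx
  | cons a t ih =>
    intro m x hx
    rw [List.foldl_cons]
    rcases List.mem_cons.mp hx with rfl | hx'
    · calc w x ≤ max m (w x) := le_max_right _ _
        _ ≤ _ := by rw [foldl_max_shift]; exact le_max_left _ _
    · exact ih _ x hx'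

theorem foldl_effval {α : Type} (w : α → Nat) (e : String → α → String) :
    ∀ (L : List α), (∀ x ∈ L, w x ≤ 2) →
      (∀ x ∈ L, ∀ m ≤ 2, e (feVal m) x = feVal (max m (w x))) →
      ∀ m ≤ 2, L.foldl e (feVal m) = feVal (L.foldl (fun n x => max n (w x)) m) := by
  intro L
  induction L with
  | nil => intro _ _ m _; rfl
  | cons a t ih =>
    intro hw he m hm
    rw [List.foldl_cons, he a (by simp) m hm, List.foldl_cons,
      ih (fun x hx => hw x (by simp [hx])) (fun x hx => he x (by simp [hx]))
        (max m (w a)) (max_le hm (hw a (by simp)))]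

-- A-side characterisations of the three scan loops
theorem feInRow_iff (cube : List (List String)) (rs gr : PySem.Set (Int × Int)) (row i : Int) (ch : Char) :
    feInRow cube rs gr row i ch = true ↔
      ∃ c, (0 ≤ c ∧ c < 4) ∧ ¬c = i ∧ (row, c) ∉ rs ∧
        feCell cube row c = some (String.ofList [ch]) ∧ (row, c) ∉ gr := by
  simp only [feInRow, List.any_eq_true, PySem.List.mem_pyRange_one]
  constructor
  · rintro ⟨c, hb, hcond⟩
    cases hci : (c == i || PySem.Set.contains rs (row, c)) with
    | true => rw [if_pos hci] at hcond; exact absurd hcond (by simp)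
    | false =>
      rw [if_neg (by rw [hci]; simp)] at hcond
      simp only [Bool.or_eq_false_iff, beq_eq_false_iff_ne] at hci
      simp only [Bool.and_eq_true, beq_iff_eq, Bool.not_eq_true'] at hcond
      exact ⟨c, hb, hci.1, by simpa using hci.2, hcond.1, by simpa using hcond.2⟩
  · rintro ⟨c, hb, hne, hrev, hcell, hgrn⟩
    refine ⟨c, hb, ?_⟩
    rw [if_neg (by simp [hne, hrev]), hcell]
    simp [hgrn]

theorem feInCol_iff (cube : List (List String)) (rs gr : PySem.Set (Int × Int)) (row i : Int) (ch : Char) :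
    feInCol cube rs gr row i ch = true ↔
      ∃ r, (0 ≤ r ∧ r < 4) ∧ ¬r = row ∧ (r, i) ∉ rs ∧
        feCell cube r i = some (String.ofList [ch]) ∧ (r, i) ∉ gr := by
  simp only [feInCol, List.any_eq_true, PySem.List.mem_pyRange_one]
  constructor
  · rintro ⟨r, hb, hcond⟩
    cases hci : (r == row || PySem.Set.contains rs (r, i)) with
    | true => rw [if_pos hci] at hcond; exact absurd hcond (by simp)
    | false =>
      rw [if_neg (by rw [hci]; simp)] at hcond
      simp only [Bool.or_eq_false_iff, beq_eq_false_iff_ne] at hci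
      simp only [Bool.and_eq_true, beq_iff_eq, Bool.not_eq_true'] at hcond
      exact ⟨r, hb, hci.1, by simpa using hci.2, hcond.1, by simpa using hcond.2⟩
  · rintro ⟨r, hb, hne, hrev, hcell, hgrn⟩
    refine ⟨r, hb, ?_⟩
    rw [if_neg (by simp [hne, hrev]), hcell]
    simp [hgrn]

theorem feFound_iff (cube : List (List String)) (rs gr : PySem.Set (Int × Int)) (row i : Int) (ch : Char) :
    feFoundElsewhere cube rs gr row i ch = true ↔
      ∃ r c, (0 ≤ r ∧ r < 4) ∧ (0 ≤ c ∧ c < 4) ∧ ¬r = row ∧ ¬c = i ∧ (r, c) ∉ rs ∧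
        feCell cube r c = some (String.ofList [ch]) ∧ (r, c) ∉ gr := by
  simp only [feFoundElsewhere, List.any_eq_true, PySem.List.mem_pyRange_one]
  constructor
  · rintro ⟨r, hbr, c, hbc, hcond⟩
    cases hm : (feCell cube r c == some (String.ofList [ch]) && !(PySem.Set.contains rs (r, c)) && !(PySem.Set.contains gr (r, c))) with
    | false => rw [if_neg (by rw [hm]; simp)] at hcond; exact absurd hcond (by simp)
    | true =>
      rw [if_pos hm] at hcond
      cases hrc : (r == row || c == i) with
      | true => rw [if_pos hrc] at hcond; exact absurd hcond (by simp)
      | false =>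
        simp only [Bool.or_eq_false_iff, beq_eq_false_iff_ne] at hrc
        simp only [Bool.and_eq_true, beq_iff_eq, Bool.not_eq_true'] at hm
        exact ⟨r, c, hbr, hbc, hrc.1, hrc.2, by simpa using hm.1.2, hm.1.1, by simpa using hm.2⟩
  · rintro ⟨r, c, hbr, hbc, hnr, hnc, hrev, hcell, hgrn⟩
    refine ⟨r, hbr, c, hbc, ?_⟩
    rw [if_pos (by rw [hcell]; simp [hrev, hgrn]), if_neg (by simp [hnr, hnc])]

-- (feCell …).getD "" hits a one-char string only on an in-range match
theorem cellD_eq (cube : List (List String)) (r c : Int) (ch : Char) :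
    (feCell cube r c).getD "" = String.ofList [ch] ↔ feCell cube r c = some (String.ofList [ch]) := by
  cases h : feCell cube r c with
  | none =>
    simp only [Option.getD_none]
    constructor
    · intro he
      have h2 := congrArg String.toList he
      rw [String.toList_ofList] at h2
      simp at h2
    · intro he; cases he
  | some v => simp [h]

-- B's grid accumulation at one pending position = A's Y / P / _ decision there
theorem gridFold_eq_val (sol : String) (cube : List (List String)) (row : Int)
    (blocked rs gr : PySem.Set (Int × Int))
    (hbl : ∀ x, x ∈ blocked ↔ x ∈ rs ∨ x ∈ gr)
    (jI : Int) (hj0 : 0 ≤ jI) (hj4 : jI < 4) (hr0 : 0 ≤ row) (hr4 : row < 4)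
    (ch : Char) (hsp : ¬ch = ' ') (hgn : ¬some ch = PySem.List.pyGet? sol.toList jI) :
    (PySem.List.pyRange 0 4 1).foldl (fun v r => (PySem.List.pyRange 0 4 1).foldl (fun v c =>
        if PySem.Set.contains blocked (r, c) then v
        else feFB sol row ((feCell cube r c).getD "") r c ch jI v) v) "_" =
      (if (feInRow cube rs gr row jI ch || feInCol cube rs gr row jI ch) = true then "Y"
       else if feFoundElsewhere cube rs gr row jI ch = true then "P" else "_") := by
  have hfree : ∀ a b : Int, ¬PySem.Set.contains blocked (a, b) = true ↔ ((a, b) ∉ rs ∧ (a, b) ∉ gr) := by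
    intro a b
    rw [PySem.Set.contains_iff, hbl]
    tauto
  set G := PySem.List.pyRange 0 4 1 with hG
  set w := feW cube blocked row jI ch with hw
  set W := fun r => G.foldl (fun n c => max n (w r c)) 0 with hWdef
  -- the fold computes feVal of the nested max
  have hinner : ∀ r ∈ G, ∀ m ≤ 2,
      G.foldl (fun v c => if PySem.Set.contains blocked (r, c) then v
        else feFB sol row ((feCell cube r c).getD "") r c ch jI v) (feVal m) = feVal (max m (W r)) := by
    intro r _ m hm
    rw [foldl_effval (w r) _ G (fun c _ => feW_le cube blocked row jI ch r c)
      (fun c _ m hm => feFB_val sol row blocked cube ch jI hsp hgn r c m hm) m hm,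
      hWdef]
    congr 1
    exact foldl_max_shift (w r) G m
  have hWle : ∀ r ∈ G, W r ≤ 2 :=
    fun r _ => foldl_max_le _ 2 G 0 (by omega) (fun c _ => feW_le cube blocked row jI ch r c)
  have hmain :
      G.foldl (fun v r => G.foldl (fun v c => if PySem.Set.contains blocked (r, c) then v
        else feFB sol row ((feCell cube r c).getD "") r c ch jI v) v) "_" =
        feVal (G.foldl (fun n r => max n (W r)) 0) := by
    have h0 : ("_" : String) = feVal 0 := rfl
    rw [h0, foldl_effval W _ G hWle hinner 0 (by omega)]
  rw [hmain]
  -- bridge the weights with A's existential scans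
  have hw2 : ∀ r c : Int, w r c = 2 ↔
      (¬PySem.Set.contains blocked (r, c) = true ∧
        feCell cube r c = some (String.ofList [ch]) ∧ ((r == row) != (c == jI)) = true) := by
    intro r c
    rw [hw]; unfold feW
    by_cases hb : PySem.Set.contains blocked (r, c) = true
    · rw [if_pos hb]
      constructor
      · intro h; exact absurd h (by decide)
      · rintro ⟨hnb, -, -⟩; exact absurd hb hnb
    · rw [if_neg hb]
      by_cases hl : (feCell cube r c).getD "" = String.ofList [ch]
      · rw [if_neg (not_not_intro hl)]
        by_cases hx : ((r == row) != (c == jI)) = true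
        · rw [if_pos hx]
          exact ⟨fun _ => ⟨hb, (cellD_eq cube r c ch).mp hl, hx⟩, fun _ => rfl⟩
        · rw [if_neg hx]
          by_cases ho : r ≠ row ∧ c ≠ jI
          · rw [if_pos ho]
            constructor
            · intro h; exact absurd h (by decide)
            · rintro ⟨-, -, hx'⟩; exact absurd hx' hx
          · rw [if_neg ho]
            constructor
            · intro h; exact absurd h (by decide)
            · rintro ⟨-, -, hx'⟩; exact absurd hx' hx
      · rw [if_pos hl]
        constructor
        · intro h; exact absurd h (by decide)
        · rintro ⟨-, hcell, -⟩; exact absurd ((cellD_eq cube r c ch).mpr hcell) hl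
  have hw1 : ∀ r c : Int, w r c = 1 ↔
      (¬PySem.Set.contains blocked (r, c) = true ∧
        feCell cube r c = some (String.ofList [ch]) ∧ r ≠ row ∧ c ≠ jI) := by
    intro r c
    rw [hw]; unfold feW
    by_cases hb : PySem.Set.contains blocked (r, c) = true
    · rw [if_pos hb]
      constructor
      · intro h; exact absurd h (by decide)
      · rintro ⟨hnb, -, -⟩; exact absurd hb hnb
    · rw [if_neg hb]
      by_cases hl : (feCell cube r c).getD "" = String.ofList [ch]
      · rw [if_neg (not_not_intro hl)]
        by_cases hx : ((r == row) != (c == jI)) = true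
        · rw [if_pos hx]
          constructor
          · intro h; exact absurd h (by decide)
          · rintro ⟨-, -, hr, hc⟩
            simp [hr, hc] at hx
        · rw [if_neg hx]
          by_cases ho : r ≠ row ∧ c ≠ jI
          · rw [if_pos ho]
            exact ⟨fun _ => ⟨hb, (cellD_eq cube r c ch).mp hl, ho.1, ho.2⟩, fun _ => rfl⟩
          · rw [if_neg ho]
            constructor
            · intro h; exact absurd h (by decide)
            · rintro ⟨-, -, hr, hc⟩; exact absurd ⟨hr, hc⟩ ho
      · rw [if_pos hl]
        constructor
        · intro h; exact absurd h (by decide)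
        · rintro ⟨-, hcell, -, -⟩; exact absurd ((cellD_eq cube r c ch).mpr hcell) hl
  have hE2 : (feInRow cube rs gr row jI ch || feInCol cube rs gr row jI ch) = true ↔
      ∃ r ∈ G, ∃ c ∈ G, w r c = 2 := by
    rw [Bool.or_eq_true, feInRow_iff, feInCol_iff]
    constructor
    · rintro (⟨c, hb, hne, hrev, hcell, hgrn⟩ | ⟨r, hb, hne, hrev, hcell, hgrn⟩)
      · refine ⟨row, PySem.List.mem_pyRange_one.mpr ⟨hr0, hr4⟩, c, PySem.List.mem_pyRange_one.mpr hb, ?_⟩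
        rw [hw2]
        exact ⟨(hfree row c).mpr ⟨hrev, hgrn⟩, hcell, by simp [hne]⟩
      · refine ⟨r, PySem.List.mem_pyRange_one.mpr hb, jI, PySem.List.mem_pyRange_one.mpr ⟨hj0, hj4⟩, ?_⟩
        rw [hw2]
        exact ⟨(hfree r jI).mpr ⟨hrev, hgrn⟩, hcell, by simp [hne]⟩
    · rintro ⟨r, hrG, c, hcG, hwv⟩
      obtain ⟨hfr, hcell, hx⟩ := (hw2 r c).mp hwv
      obtain ⟨hrev, hgrn⟩ := (hfree r c).mp hfr
      by_cases hr : r = row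
      · subst hr
        have hc : ¬c = jI := by intro h; subst h; simp at hx
        exact Or.inl ⟨c, PySem.List.mem_pyRange_one.mp hcG, hc, hrev, hcell, hgrn⟩
      · have hc : c = jI := by by_contra h; simp [hr, h] at hx
        subst hc
        exact Or.inr ⟨r, PySem.List.mem_pyRange_one.mp hrG, hr, hrev, hcell, hgrn⟩
  have hE1 : feFoundElsewhere cube rs gr row jI ch = true ↔ ∃ r ∈ G, ∃ c ∈ G, w r c = 1 := by
    rw [feFound_iff]
    constructor
    · rintro ⟨r, c, hbr, hbc, hnr, hnc, hrev, hcell, hgrn⟩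
      refine ⟨r, PySem.List.mem_pyRange_one.mpr hbr, c, PySem.List.mem_pyRange_one.mpr hbc, ?_⟩
      rw [hw1]
      exact ⟨(hfree r c).mpr ⟨hrev, hgrn⟩, hcell, hnr, hnc⟩
    · rintro ⟨r, hrG, c, hcG, hwv⟩
      obtain ⟨hfr, hcell, hnr, hnc⟩ := (hw1 r c).mp hwv
      obtain ⟨hrev, hgrn⟩ := (hfree r c).mp hfr
      exact ⟨r, c, PySem.List.mem_pyRange_one.mp hrG, PySem.List.mem_pyRange_one.mp hcG, hnr, hnc, hrev, hcell, hgrn⟩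
  by_cases h2 : (feInRow cube rs gr row jI ch || feInCol cube rs gr row jI ch) = true
  · obtain ⟨r, hrG, c, hcG, hwv⟩ := hE2.mp h2
    have hS : G.foldl (fun n r => max n (W r)) 0 = 2 := by
      refine le_antisymm (foldl_max_le W 2 G 0 (by omega) hWle) ?_
      calc (2 : Nat) = w r c := hwv.symm
        _ ≤ W r := le_foldl_max_of_mem (w r) G 0 c hcG
        _ ≤ _ := le_foldl_max_of_mem W G 0 r hrG
    rw [hS, if_pos h2]
    rfl
  · by_cases h1 : feFoundElsewhere cube rs gr row jI ch = true
    · obtain ⟨r, hrG, c, hcG, hwv⟩ := hE1.mp h1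
      have hle1 : ∀ r' ∈ G, W r' ≤ 1 := by
        intro r' hr'
        refine foldl_max_le (w r') 1 G 0 (by omega) ?_
        intro c' hc'
        rw [hw]
        rcases feW_cases cube blocked row jI ch r' c' with h | h | h
        · omega
        · omega
        · exact absurd (hE2.mpr ⟨r', hr', c', hc', by rw [hw]; exact h⟩) h2
      have hS : G.foldl (fun n r => max n (W r)) 0 = 1 := by
        refine le_antisymm (foldl_max_le W 1 G 0 (by omega) hle1) ?_
        calc (1 : Nat) = w r c := hwv.symm
          _ ≤ W r := le_foldl_max_of_mem (w r) G 0 c hcG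
          _ ≤ _ := le_foldl_max_of_mem W G 0 r hrG
      rw [hS, if_neg h2, if_pos h1]
      rfl
    · have hle0 : ∀ r' ∈ G, W r' ≤ 0 := by
        intro r' hr'
        refine foldl_max_le (w r') 0 G 0 (by omega) ?_
        intro c' hc'
        rw [hw]
        rcases feW_cases cube blocked row jI ch r' c' with h | h | h
        · omega
        · exact absurd (hE1.mpr ⟨r', hr', c', hc', by rw [hw]; exact h⟩) h1
        · exact absurd (hE2.mpr ⟨r', hr', c', hc', by rw [hw]; exact h⟩) h2
      have hS : G.foldl (fun n r => max n (W r)) 0 = 0 :=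
        Nat.le_zero.mp (foldl_max_le W 0 G 0 (by omega) hle0)
      rw [hS, if_neg h2, if_neg h1]
      rfl

-- the grid walk seen at one entry of the rank list
theorem feGrid_getD (guess sol : String) (cube : List (List String)) (row : Int)
    (blocked : PySem.Set (Int × Int)) (j : Nat) (hj4 : j < 4) (hjg : j < guess.toList.length) :
    (feGrid guess sol cube row blocked (List.replicate 4 "_")).length = 4 ∧
    (feGrid guess sol cube row blocked (List.replicate 4 "_")).getD j "" =
      (PySem.List.pyRange 0 4 1).foldl (fun v r => (PySem.List.pyRange 0 4 1).foldl (fun v c =>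
          if PySem.Set.contains blocked (r, c) then v
          else feFB sol row ((feCell cube r c).getD "") r c (guess.toList.getD j ' ') (j : Int) v) v)
        ((List.replicate 4 "_").getD j "") := by
  unfold feGrid
  refine foldl_entry _ _ j _ (List.replicate 4 "_") (by simp) ?_
  intro rk r hrk
  refine foldl_entry _ _ j _ rk hrk ?_
  intro rk' c hrk'
  by_cases hb : PySem.Set.contains blocked (r, c) = true
  · rw [if_pos hb, if_pos hb]
    exact ⟨hrk', rfl⟩
  · rw [if_neg hb, if_neg hb, feInner_eq]
    constructor
    · rw [feLoop_length _ (fun ch i res => PySem.List.length_pySetD res i _), hrk']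
    · rw [show (0 : Int) = ((0 : Nat) : Int) from rfl,
        feLoop_getD _ _ (fun _ _ _ => rfl),
        if_pos ⟨Nat.zero_le j, by omega, by omega⟩]
      simp

theorem chars_join_nil_eq_flatten (l : List (List Char)) : PySem.Chars.join [] l = l.flatten := by
  induction l with
  | nil => rfl
  | cons a t ih =>
    cases t with
    | nil => simp [PySem.Chars.join_singleton]
    | cons b t' => rw [PySem.Chars.join_cons_cons, ih]; simp

theorem join_append_pad (l : List String) (k : Nat) :
    PySem.Str.join "" (l ++ List.replicate k "_") =
      PySem.Str.join "" l ++ String.ofList (List.replicate k '_') := by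
  apply String.toList_inj.mp
  simp [PySem.Str.join, chars_join_nil_eq_flatten, List.map_replicate]

theorem map_enumerate_getD (g : List Char) (F : Int × Char → String) (s : Int) (j : Nat)
    (h : j < g.length) :
    ((PySem.List.enumerate g s).map F).getD j "" = F (s + (j : Int), g.getD j ' ') := by
  rw [List.getD_eq_getElem?_getD, List.getElem?_map, PySem.List.getElem?_enumerate]
  simp [List.getElem?_eq_getElem h, List.getD_eq_getElem _ _ h]

theorem getD_append_left (l r : List String) (j : Nat) (h : j < l.length) :
    (l ++ r).getD j "" = l.getD j "" := by
  simp [List.getD_eq_getElem?_getD, List.getElem?_append_left h]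

theorem getD_append_right' (l r : List String) (j : Nat) (h : l.length ≤ j) :
    (l ++ r).getD j "" = r.getD (j - l.length) "" := by
  simp [List.getD_eq_getElem?_getD, List.getElem?_append_right h]

-- ===== VERDICT (by name: the statement is the Claim_ definition above) =====
set_option maxHeartbeats 2000000 in
theorem compute_feedback_enhanced_spec : Claim_equal_compute_feedback_enhanced := by
  intro guess sol cube row rev att fbs cf sg _hdom hpre
  obtain ⟨h4, hsol, hcube⟩ := hpre
  unfold Spec_compute_feedback_enhanced
  simp only [compute_feedback_enhanced, compute_feedback_enhanced_alt]
  have hmem := fun x => mem_feBlocked guess sol row rev fbs cf sg (List.replicate 4 "_") x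
  rw [feP1_fst_eq, feP2_eq, feP3_eq, ← join_append_pad]
  rw [show (0 : Int) = ((0 : Nat) : Int) from rfl]
  have hlen : ∀ (f : Char → Int → String → String) (res : List String),
      (feLoop (fun ch i r => PySem.List.pySetD r i (f ch i (PySem.List.pyGetD r i ""))) guess.toList ((0 : Nat) : Int) res).length = res.length :=
    fun f res => feLoop_length _ (fun ch i r => PySem.List.length_pySetD r i _) guess.toList _ res
  have l1 := hlen (feF1 sol) (List.replicate 4 "_")
  have l2 := hlen (feF2 cube (PySem.Set.ofList rev) ((feP1 sol row guess.toList ((0 : Nat) : Int) (List.replicate 4 "_") (feGreensA sg fbs cf)).2) row)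
      (feLoop (fun ch i r => PySem.List.pySetD r i (feF1 sol ch i (PySem.List.pyGetD r i ""))) guess.toList ((0 : Nat) : Int) (List.replicate 4 "_"))
  rw [l1] at l2
  simp only [List.length_replicate] at l1 l2
  have h4' : guess.length ≤ 4 := by simpa using h4
  have hlg : guess.toList.length = guess.length := String.length_toList
  congr 1
  apply List.ext_getElem
  · rw [hlen, l2]
    simp [PySem.List.length_enumerate]
    omega
  · intro j hj1 hj2
    have hj4 : j < 4 := by have h := hj1; rwa [hlen, l2] at h
    rw [← List.getD_eq_getElem _ "" hj1, ← List.getD_eq_getElem _ "" hj2,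
      feLoop_getD _ _ (fun _ _ _ => rfl), feLoop_getD _ _ (fun _ _ _ => rfl),
      feLoop_getD _ _ (fun _ _ _ => rfl), l1, l2]
    by_cases hjn : j < guess.toList.length
    · rw [if_pos ⟨by omega, by omega, by omega⟩, if_pos ⟨by omega, by omega, by omega⟩,
        if_pos ⟨by omega, by omega, by simpa using hj4⟩,
        getD_append_left _ _ _ (by rw [List.length_map, PySem.List.length_enumerate]; exact hjn),
        map_enumerate_getD _ _ _ _ hjn]
      simp only [Nat.cast_zero, zero_add, Nat.sub_zero,
        show (List.replicate 4 "_").getD j "" = "_" by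
          rw [List.getD_eq_getElem _ "" (by simpa using hj4), List.getElem_replicate]]
      set ch := guess.toList.getD j ' ' with hch
      by_cases hsp : ch = ' '
      · simp [feF1, feF2, feF3, hsp]
      · by_cases hgn : some ch = PySem.List.pyGet? sol.toList (j : Int)
        · simp [feF1, feF2, feF3, hsp, hgn, PySem.Str.pyGet?, PySem.Chars.pyGet?]
        · -- pending position: both sides do the real Y/P/_ classification
          have hgn' : ¬some ch = PySem.Str.pyGet? sol (j : Int) := hgn
          have hjs : j < sol.toList.length := hsol j (List.mem_range.mpr hjn) (by rw [← hch]; exact hsp)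
          have hsl : sol.toList.length = sol.length := String.length_toList
          have hgn2 : ¬some ch = sol.toList[j]? := by
            simpa [PySem.List.pyGet?, PySem.List.pyIdx?, show j < sol.length from hsl ▸ hjs] using hgn
          have hbnds := hcube ⟨j, List.mem_range.mpr hjn, hsp,
            fun heq => hgn2 (by rw [heq, hch, List.getD_eq_getElem?_getD])⟩
          obtain ⟨_, _, hr0, hr4⟩ := hbnds
          -- B's guard is true: position j witnesses it
          have hguard : ((PySem.List.enumerate guess.toList).any
              (fun p => p.2 != ' ' && !(some p.2 == PySem.Str.pyGet? sol p.1))) = true := by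
            rw [List.any_eq_true]
            refine ⟨((j : Int), ch), ?_, by simp [hsp, hgn2]⟩
            have hg : (PySem.List.enumerate guess.toList 0)[j]? = some ((j : Int), ch) := by
              rw [PySem.List.getElem?_enumerate]
              simp [List.getElem?_eq_getElem hjn, hch, List.getD_eq_getElem _ _ hjn]
            exact List.mem_of_getElem? hg
          rw [if_pos hguard]
          obtain ⟨hgl, hgd⟩ := feGrid_getD guess sol cube row
            (feBlocked guess sol row rev fbs cf sg) j hj4 hjn
          rw [show PySem.List.pyGetD (feGrid guess sol cube row (feBlocked guess sol row rev fbs cf sg) (List.replicate 4 "_")) ((j : Int)) "_"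
              = (feGrid guess sol cube row (feBlocked guess sol row rev fbs cf sg) (List.replicate 4 "_")).getD j "" by
            rw [PySem.List.pyGetD_natCast,
              List.getD_eq_getElem _ "_" (by omega), List.getD_eq_getElem _ "" (by omega)]]
          rw [hgd,
            show (List.replicate 4 "_").getD j "" = "_" by
              rw [List.getD_eq_getElem _ "" (by simpa using hj4), List.getElem_replicate]]
          rw [gridFold_eq_val sol cube row _ (PySem.Set.ofList rev)
            ((feP1 sol row guess.toList ((0 : Nat) : Int) (List.replicate 4 "_") (feGreensA sg fbs cf)).2)
            hmem (j : Int) (Int.natCast_nonneg j) (by omega) hr0 hr4 ch hsp hgn']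
          simp [feF1, feF2, feF3, hsp, hgn2]
          split_ifs <;> simp_all
    · rw [if_neg (by omega), if_neg (by omega), if_neg (by omega),
        getD_append_right' _ _ _ (by rw [List.length_map, PySem.List.length_enumerate]; omega),
        List.length_map, PySem.List.length_enumerate,
        List.getD_eq_getElem (List.replicate 4 "_") "" (by simpa using hj4), List.getElem_replicate,
        List.getD_eq_getElem (List.replicate (4 - guess.toList.length) "_") ""
          (by rw [List.length_replicate]; omega), List.getElem_replicate]
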